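-- pv_equiv track=rewrite | github.com/andyfischer/circa | docs/nanodoc/nanohtml.py | divideListIntoTwo
-- ===== SOURCE A (Python) =====
-- def divideListIntoTwo(l):
--     left_list = []
--     right_list = []
--     left = True
--     for i in l:
--         if left: left_list.append(i)
--         else: right_list.append(i)
--         left = not left
--     return (left_list, right_list)
-- ===== SOURCE B (Python) =====
-- def divideListIntoTwo(l):
--     l = list(l)
--     return (l[::2], l[1::2])
-- ===== Notes on version B (the rewrite author's own statement) =====
-- stated objective: idiomatic
-- what changed: Replaces the toggle-flag loop with two strided slices l[::2] and l[1::2].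
import Mathlib
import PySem

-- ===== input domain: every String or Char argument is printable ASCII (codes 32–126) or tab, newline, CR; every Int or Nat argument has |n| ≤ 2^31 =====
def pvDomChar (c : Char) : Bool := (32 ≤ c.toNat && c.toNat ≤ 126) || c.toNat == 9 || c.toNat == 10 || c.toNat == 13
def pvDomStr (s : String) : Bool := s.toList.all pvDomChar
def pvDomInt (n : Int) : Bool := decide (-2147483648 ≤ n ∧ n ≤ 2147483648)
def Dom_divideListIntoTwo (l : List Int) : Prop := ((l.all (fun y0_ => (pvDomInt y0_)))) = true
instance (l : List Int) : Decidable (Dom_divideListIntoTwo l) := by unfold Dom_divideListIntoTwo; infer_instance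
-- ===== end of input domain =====

-- B replaces A's toggle-flag loop with two strided slices l[::2] and l[1::2] (idiomatic; same cost).

-- ===== PORT A =====
-- the for-loop over l with state (left_list, right_list, left)
def divideLoop : List Int → List Int → List Int → Bool → List Int × List Int
  | [], leftList, rightList, _ => (leftList, rightList)
  | i :: rest, leftList, rightList, left =>
      if left then divideLoop rest (leftList ++ [i]) rightList (!left)
      else divideLoop rest leftList (rightList ++ [i]) (!left)

def divideListIntoTwo (l : List Int) : List Int × List Int :=
  divideLoop l [] [] true

-- ===== PORT B =====
-- l[::2] : every second element starting at index 0 (hand port of the stride-2 slice; exact)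
def strideTwo : List Int → List Int
  | [] => []
  | [x] => [x]
  | x :: _ :: xs => x :: strideTwo xs

-- l[1::2] = (tail of l)[::2]
def divideListIntoTwo_alt (l : List Int) : List Int × List Int :=
  (strideTwo l, strideTwo l.tail)

-- ===== PRECONDITION & SPEC =====
def Spec_divideListIntoTwo (l : List Int) (out : List Int × List Int) : Prop := out = divideListIntoTwo_alt l
instance (l : List Int) (out : List Int × List Int) : Decidable (Spec_divideListIntoTwo l out) := by unfold Spec_divideListIntoTwo; infer_instance

-- ===== CLAIM (what is proved, stated in full; the proofs are below) =====
def Claim_equal_divideListIntoTwo : Prop := ∀ (l : List Int), Dom_divideListIntoTwo l → Spec_divideListIntoTwo l (divideListIntoTwo l)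

-- ===== LEMMAS AND PROOFS =====
theorem strideTwo_cons (i : Int) (rest : List Int) :
    strideTwo (i :: rest) = i :: strideTwo rest.tail := by
  cases rest <;> simp [strideTwo]

theorem divideLoop_eq (l : List Int) : ∀ (L R : List Int) (left : Bool),
    divideLoop l L R left =
      if left then (L ++ strideTwo l, R ++ strideTwo l.tail)
      else (L ++ strideTwo l.tail, R ++ strideTwo l) := by
  induction l with
  | nil => intro L R left; cases left <;> simp [divideLoop, strideTwo]
  | cons i rest ih =>
    intro L R left
    cases left <;> simp [divideLoop, ih, strideTwo_cons]

-- ===== VERDICT (by name: the statement is the Claim_ definition above) =====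
theorem divideListIntoTwo_spec : Claim_equal_divideListIntoTwo := by
  intro l _
  show _ = _
  simp [divideListIntoTwo, divideLoop_eq, divideListIntoTwo_alt]
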